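-- pv_equiv track=rewrite | github.com/emartirequena/viewRationals | src/viewRationals/transform2.py | _num_ones
-- ===== SOURCE A (Python) =====
-- def _num_ones(seq: list[int]) -> tuple[int]:
--     """
--     Gets the number of ones on each dimension of a sequence of digits
--     Args:
--         seq (list of int): sequence of digits
--     """
--     nx = 0
--     ny = 0
--     nz = 0
--     for d in seq:
--         nx += d % 2
--         ny += (d // 2) % 2
--         nz += (d // 4) % 2
--     return nx, ny, nz
-- ===== SOURCE B (Python) =====
-- def _num_ones(seq: list[int]) -> tuple[int]:
--     """Grouped re-implementation: count each distinct digit once, then weight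
--     the per-digit bit contributions by their multiplicities."""
--     cnt = {}
--     for d in seq:
--         cnt[d] = cnt.get(d, 0) + 1
--     nx = sum(c * (d & 1) for d, c in cnt.items())
--     ny = sum(c * ((d >> 1) & 1) for d, c in cnt.items())
--     nz = sum(c * ((d >> 2) & 1) for d, c in cnt.items())
--     return nx, ny, nz
-- ===== Notes on version B (the rewrite author's own statement) =====
-- stated objective: alternative
-- what changed: B replaces A's per-element accumulation of the three bit sums by a grouped pass: it first builds a frequency dictionary of the digit values, then sums each bit extracted with bitwise &/>> once per DISTINCT value weighted by its count.
import Mathlib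
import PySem

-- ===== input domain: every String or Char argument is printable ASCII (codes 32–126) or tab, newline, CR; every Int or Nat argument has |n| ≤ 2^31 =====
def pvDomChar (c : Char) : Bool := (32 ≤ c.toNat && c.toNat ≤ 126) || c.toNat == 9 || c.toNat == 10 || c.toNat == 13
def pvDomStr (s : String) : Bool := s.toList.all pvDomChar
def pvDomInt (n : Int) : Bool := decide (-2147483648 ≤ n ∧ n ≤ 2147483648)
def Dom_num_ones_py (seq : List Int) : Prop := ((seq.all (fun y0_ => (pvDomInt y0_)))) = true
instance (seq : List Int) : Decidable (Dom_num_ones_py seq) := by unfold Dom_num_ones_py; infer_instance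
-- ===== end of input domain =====

-- B builds a frequency dictionary first, then sums the bit contributions once per
-- DISTINCT value weighted by its count (alternative decomposition; same result).

-- ===== PORT A =====
def num_ones_py (seq : List Int) : Int × Int × Int :=
  seq.foldl
    (fun s d =>
      (s.1 + PySem.Int.mod d 2,
       s.2.1 + PySem.Int.mod (PySem.Int.floordiv d 2) 2,
       s.2.2 + PySem.Int.mod (PySem.Int.floordiv d 4) 2))
    (0, 0, 0)

-- ===== PORT B =====
-- `d >> k` is Lean's `Int.shiftRight d k` (floor shift, Python-exact per PYSEM.md)
def num_ones_py_alt (seq : List Int) : Int × Int × Int :=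
  let cnt : PySem.Dict Int Int :=
    seq.foldl (fun d x => d.modify x 0 (· + 1)) PySem.Dict.empty
  let nx := (cnt.items.map (fun p => p.2 * PySem.Int.band p.1 1)).sum
  let ny := (cnt.items.map (fun p => p.2 * PySem.Int.band (Int.shiftRight p.1 1) 1)).sum
  let nz := (cnt.items.map (fun p => p.2 * PySem.Int.band (Int.shiftRight p.1 2) 1)).sum
  (nx, ny, nz)

-- ===== PRECONDITION & SPEC =====
def Spec_num_ones_py (seq : List Int) (out : Int × Int × Int) : Prop := out = num_ones_py_alt seq
instance (seq : List Int) (out : Int × Int × Int) : Decidable (Spec_num_ones_py seq out) := by unfold Spec_num_ones_py; infer_instance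

-- ===== CLAIM (what is proved, stated in full; the proofs are below) =====
def Claim_equal_num_ones_py : Prop := ∀ (seq : List Int), Dom_num_ones_py seq → Spec_num_ones_py seq (num_ones_py seq)

-- ===== LEMMAS AND PROOFS =====

-- A's fold written as three map-sums
theorem numOnes_foldl_eq (l : List Int) : ∀ (a b c : Int),
    l.foldl
      (fun s d =>
        (s.1 + PySem.Int.mod d 2,
         s.2.1 + PySem.Int.mod (PySem.Int.floordiv d 2) 2,
         s.2.2 + PySem.Int.mod (PySem.Int.floordiv d 4) 2))
      (a, b, c)
    = (a + (l.map (fun d => PySem.Int.mod d 2)).sum,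
       b + (l.map (fun d => PySem.Int.mod (PySem.Int.floordiv d 2) 2)).sum,
       c + (l.map (fun d => PySem.Int.mod (PySem.Int.floordiv d 4) 2)).sum) := by
  induction l with
  | nil => simp
  | cons x xs ih =>
      intro a b c
      simp only [List.foldl_cons, List.map_cons, List.sum_cons, ih]
      refine Prod.ext ?_ (Prod.ext ?_ ?_) <;> simp <;> ring

-- count-weighted sum over the distinct values equals the plain sum over the list
theorem grouped_sum (l : List Int) (g : Int → Int) :
    ((PySem.Set.ofList l).map (fun k => ((l.count k : Int)) * g k)).sum = (l.map g).sum := by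
  rw [← List.sum_toFinset _ (PySem.Set.nodup_ofList l)]
  have hfin : (PySem.Set.ofList l).toFinset = l.toFinset := by
    ext x; simp [PySem.Set.mem_ofList]
  rw [hfin, Finset.sum_list_map_count]
  refine Finset.sum_congr rfl (fun x _ => ?_)
  simp

theorem shiftRight_eq_floordiv (d : Int) (n : Nat) :
    Int.shiftRight d n = PySem.Int.floordiv d (2 ^ n) := by
  have : d >>> n = Int.shiftRight d n := rfl
  rw [← this, Int.shiftRight_eq_div_pow,
    PySem.Int.floordiv_eq_ediv_of_pos (by positivity)]
  norm_num

theorem band_sum_zero (l : List Int) :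
    ((PySem.Dict.counter l).items.map (fun p => p.2 * PySem.Int.band p.1 1)).sum
    = (l.map (fun d => PySem.Int.mod d 2)).sum := by
  rw [PySem.Dict.items_counter, List.map_map, ← grouped_sum l]
  exact congrArg List.sum (List.map_congr_left (fun k _ => by
    simp [PySem.Int.band_one]))

theorem band_sum_component (l : List Int) (n : Nat) :
    ((PySem.Dict.counter l).items.map
        (fun p => p.2 * PySem.Int.band (Int.shiftRight p.1 n) 1)).sum
    = (l.map (fun d => PySem.Int.mod (PySem.Int.floordiv d (2 ^ n)) 2)).sum := by
  rw [PySem.Dict.items_counter, List.map_map, ← grouped_sum l]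
  exact congrArg List.sum (List.map_congr_left (fun k _ => by
    simp [PySem.Int.band_one, shiftRight_eq_floordiv]))

-- ===== VERDICT (by name: the statement is the Claim_ definition above) =====
theorem num_ones_py_spec : Claim_equal_num_ones_py := by
  intro seq _
  show num_ones_py seq = num_ones_py_alt seq
  unfold num_ones_py num_ones_py_alt
  have hc : seq.foldl (fun d x => d.modify x 0 (· + 1)) PySem.Dict.empty
      = PySem.Dict.counter seq := rfl
  rw [numOnes_foldl_eq, hc]
  have h0 := band_sum_zero seq
  have h1 := band_sum_component seq 1
  have h2 := band_sum_component seq 2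
  simp only [show ((2:Int)^1) = 2 from rfl, show ((2:Int)^2) = 4 from rfl] at h1 h2
  simp only [h0, h1, h2, zero_add]
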